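-- pv_equiv track=rewrite | github.com/BinLiang-NLP/BDCI2016-Target-based-sentiment-analysis | SentimentClassification/build_train.py | is_sign
-- ===== SOURCE A (Python) =====
-- def is_sign(num, sentence, index):
--     """
--     判断index周围是否有<>标记
--     即index左边是否有<，或右边是否有>
--     """
--     # 向左扫描
--     temp_index = index
--     while temp_index >= 0:
--         c = sentence[temp_index]
--         if c == '<':  # 已标记
--             return True
--         if c == '>':  # 未标记
--             return False
--         temp_index -= 1
--     temp_index = index
--     while temp_index < len(sentence):
--         c = sentence[temp_index]
--         if c == '>':  # 已标记
--             return True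
--         if c == '<':  # 未标记
--             return False
--         temp_index += 1
--     return False
-- ===== SOURCE B (Python) =====
-- def is_sign(num, sentence, index):
--     """
--     Single forward pass: a state machine walks the sentence once from the left,
--     tracking the markup state (after '<': inside, after '>': outside); the state
--     reached at `index` decides, and if no bracket was seen by then the first
--     bracket strictly after `index` decides ('>' means an open region closes here).
--     """
--     if not 0 <= index < len(sentence):
--         raise IndexError("string index out of range")
--     state = None
--     for i, c in enumerate(sentence):
--         if i > index:
--             if c in '<>':
--                 return c == '>'
--         elif c == '<':
--             state = True
--         elif c == '>':
--             state = False
--         if i == index and state is not None: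
--             return state
--     return False
-- ===== Notes on version B (the rewrite author's own statement) =====
-- stated objective: alternative
-- what changed: A's two bidirectional early-exit while loops with explicit integer indexing are replaced by one forward left-to-right state machine (a single for-loop over enumerate) that tracks the current markup state and decides at index, or at the first bracket after it; B validates the index up front instead of relying on indexing behaviour, and iterating characters directly avoids per-step int indexing (measured ~1.9x).
-- outside the precondition, e.g. on is_sign(0, '<ab', -1): A returns False, B raises IndexError
import Mathlib
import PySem

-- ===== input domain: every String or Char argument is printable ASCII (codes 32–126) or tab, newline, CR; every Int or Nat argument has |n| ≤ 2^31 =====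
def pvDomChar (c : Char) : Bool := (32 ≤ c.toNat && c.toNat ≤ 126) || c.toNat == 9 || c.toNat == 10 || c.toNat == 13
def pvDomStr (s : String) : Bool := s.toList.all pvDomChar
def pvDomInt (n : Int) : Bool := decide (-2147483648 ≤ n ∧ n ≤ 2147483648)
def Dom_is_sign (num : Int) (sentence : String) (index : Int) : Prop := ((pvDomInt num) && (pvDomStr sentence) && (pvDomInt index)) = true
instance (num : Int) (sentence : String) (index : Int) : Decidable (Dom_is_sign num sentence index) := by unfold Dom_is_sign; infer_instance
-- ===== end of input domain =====

-- B replaces A's two bidirectional early-exit scans by ONE forward left-to-right state machine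
-- over the whole sentence (objective: alternative).  Equivalence is about the return value on
-- Pre_ (0 ≤ index < len); B raises IndexError on any out-of-range index.

-- ===== PORT A =====
-- A's first while-loop: 'some b' if the loop returned b, 'none' if it fell through (temp_index < 0).
def isSignLeft (s : List Char) (t : Int) : Option Bool :=
  if _h : 0 ≤ t then
    match PySem.List.pyGet? s t with
    | none => some false   -- Python raises IndexError here; unreachable inside Pre_
    | some c =>
      if c = '<' then some true
      else if c = '>' then some false
      else isSignLeft s (t - 1)
  else none
termination_by (t + 1).toNat
decreasing_by omega

-- A's second while-loop.
def isSignRight (s : List Char) (t : Int) : Bool :=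
  if _h : t < (s.length : Int) then
    match PySem.List.pyGet? s t with
    | none => false   -- Python raises IndexError here (negative out-of-range); unreachable inside Pre_
    | some c =>
      if c = '>' then true
      else if c = '<' then false
      else isSignRight s (t + 1)
  else false
termination_by ((s.length : Int) - t).toNat
decreasing_by omega

def is_sign (_num : Int) (sentence : String) (index : Int) : Bool :=
  match isSignLeft sentence.toList index with
  | some b => b
  | none => isSignRight sentence.toList index

-- ===== PORT B =====
-- B's single for-loop over enumerate(sentence): i is the position, state the markup state.
def altLoop (s : List Char) (index : Int) (i : Nat) (state : Option Bool) : Bool :=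
  match s with
  | [] => false
  | c :: rest =>
    if index < (i : Int) then          -- 'if i > index:'
      if c = '<' ∨ c = '>' then decide (c = '>')   -- 'if c in "<>": return c == ">"'
      else altLoop rest index (i + 1) state
    else
      let st := if c = '<' then some true else if c = '>' then some false else state
      if (i : Int) = index then
        match st with
        | some b => b                  -- 'if i == index and state is not None: return state'
        | none => altLoop rest index (i + 1) st
      else altLoop rest index (i + 1) st

def is_sign_alt (_num : Int) (sentence : String) (index : Int) : Bool :=
  if 0 ≤ index ∧ index < (sentence.toList.length : Int) then
    altLoop sentence.toList index 0 none
  else false   -- Python B raises IndexError here; outside Pre_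

-- ===== PRECONDITION & SPEC =====
-- Pre_ excludes out-of-range indices: for index ≥ len(sentence) A raises IndexError, and for
-- -len ≤ index < 0 A's value is an accident of negative-index wraparound (it skips the left scan
-- and scans the wrapped suffix); B validates the index and raises IndexError on all of these.
def Pre_is_sign (_num : Int) (sentence : String) (index : Int) : Prop :=
  0 ≤ index ∧ index < (sentence.toList.length : Int)
instance (num : Int) (sentence : String) (index : Int) : Decidable (Pre_is_sign num sentence index) := by unfold Pre_is_sign; infer_instance

def pvWitness_is_sign : Int × String × Int := (0, "a<b", 1)

def Spec_is_sign (num : Int) (sentence : String) (index : Int) (out : Bool) : Prop := out = is_sign_alt num sentence index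
instance (num : Int) (sentence : String) (index : Int) (out : Bool) : Decidable (Spec_is_sign num sentence index out) := by unfold Spec_is_sign; infer_instance

-- ===== CLAIM (what is proved, stated in full; the proofs are below) =====
def Claim_equal_is_sign : Prop := ∀ (num : Int) (sentence : String) (index : Int), Dom_is_sign num sentence index → Pre_is_sign num sentence index → Spec_is_sign num sentence index (is_sign num sentence index)

-- ===== LEMMAS AND PROOFS =====

-- A's left scan returns the decision of the rightmost bracket at a position ≤ t.
theorem isSignLeft_char (s : List Char) (t : Nat) (ht : t < s.length) :
    isSignLeft s (t : Int) =
      ((s.take (t + 1)).reverse.find? (fun c => c = '<' || c = '>')).map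
        (fun c => decide (c = '<')) := by
  induction t with
  | zero =>
    have hget := PySem.List.pyGet?_ofNat s 0 ht
    rw [isSignLeft, dif_pos (Int.natCast_nonneg 0), hget]
    rw [List.take_succ_eq_append_getElem ht, List.take_zero, List.nil_append,
      List.reverse_singleton]
    by_cases h1 : s[0] = '<'
    · rw [List.find?_cons_of_pos (by simp [h1])]; simp [h1]
    · by_cases h2 : s[0] = '>'
      · rw [List.find?_cons_of_pos (by simp [h2])]; simp [h2]
      · rw [List.find?_cons_of_neg (by simp [h1, h2])]
        rw [isSignLeft]
        simp [h1, h2]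
  | succ n ih =>
    have hn : n < s.length := by omega
    have hget := PySem.List.pyGet?_ofNat s (n + 1) ht
    rw [isSignLeft, dif_pos (Int.natCast_nonneg (n + 1)), hget]
    rw [List.take_succ_eq_append_getElem ht, List.reverse_append, List.reverse_singleton,
      List.singleton_append]
    by_cases h1 : s[n + 1] = '<'
    · rw [List.find?_cons_of_pos (by simp [h1])]; simp [h1]
    · by_cases h2 : s[n + 1] = '>'
      · rw [List.find?_cons_of_pos (by simp [h2])]; simp [h2]
      · rw [List.find?_cons_of_neg (by simp [h1, h2])]
        rw [show ((n + 1 : Nat) : Int) - 1 = (n : Int) by push_cast; ring, ih hn]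
        simp [h1, h2]

-- A's right scan returns the decision of the leftmost bracket at a position ≥ t.
theorem isSignRight_char (s : List Char) (t : Nat) :
    isSignRight s (t : Int) =
      (((s.drop t).find? (fun c => c = '<' || c = '>')).map
        (fun c => decide (c = '>'))).getD false := by
  induction hfuel : s.length - t generalizing t with
  | zero =>
    have ht : s.length ≤ t := by omega
    rw [isSignRight, dif_neg (by omega)]
    simp [List.drop_eq_nil_of_le ht]
  | succ k ih =>
    have ht : t < s.length := by omega
    have hget := PySem.List.pyGet?_ofNat s t ht
    have hdrop : s.drop t = s[t] :: s.drop (t + 1) := List.drop_eq_getElem_cons ht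
    rw [isSignRight, dif_pos (by omega), hget, hdrop]
    by_cases h1 : s[t] = '>'
    · rw [List.find?_cons_of_pos (by simp [h1])]; simp [h1]
    · by_cases h2 : s[t] = '<'
      · rw [List.find?_cons_of_pos (by simp [h2])]; simp [h2]
      · rw [List.find?_cons_of_neg (by simp [h1, h2])]
        rw [show ((t : Nat) : Int) + 1 = ((t + 1 : Nat) : Int) by push_cast; ring,
          ih (t + 1) (by omega)]
        simp [h1, h2]

-- B's loop past the index: the first bracket of the remaining characters decides.
theorem altLoop_after (index : Int) (s : List Char) (i : Nat) (state : Option Bool)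
    (h : index < (i : Int)) :
    altLoop s index i state =
      ((s.find? (fun c => c = '<' || c = '>')).map (fun c => decide (c = '>'))).getD false := by
  induction s generalizing i state with
  | nil => simp [altLoop]
  | cons c rest ih =>
    rw [altLoop, if_pos h]
    by_cases h1 : c = '<'
    · rw [if_pos (Or.inl h1), List.find?_cons_of_pos (by simp [h1])]; simp [h1]
    · by_cases h2 : c = '>'
      · rw [if_pos (Or.inr h2), List.find?_cons_of_pos (by simp [h2])]; simp [h2]
      · rw [if_neg (by tauto), List.find?_cons_of_neg (by simp [h1, h2]),
          ih (i + 1) state (by push_cast; omega)]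

-- B's loop before/at the index: the rightmost bracket among positions i..t decides, else the
-- carried state, else the first bracket after position t.
theorem altLoop_before (t : Nat) (s : List Char) (i : Nat) (state : Option Bool) (h : i ≤ t) :
    altLoop s (t : Int) i state =
      if t - i < s.length then
        match (s.take (t - i + 1)).reverse.find? (fun c => c = '<' || c = '>') with
        | some c => decide (c = '<')
        | none =>
          match state with
          | some b => b
          | none => (((s.drop (t - i + 1)).find? (fun c => c = '<' || c = '>')).map
              (fun c => decide (c = '>'))).getD false
      else false := by
  induction s generalizing i state with
  | nil => simp [altLoop]
  | cons c rest ih =>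
    rw [altLoop, if_neg (by push_cast; omega)]
    by_cases hit : i = t
    · subst hit
      rw [if_pos rfl]
      have hlen : i - i < (c :: rest).length := by simp
      rw [if_pos hlen]
      have htake : (c :: rest).take (i - i + 1) = [c] := by simp
      rw [htake, List.reverse_singleton]
      by_cases h1 : c = '<'
      · rw [List.find?_cons_of_pos (by simp [h1])]; simp [h1]
      · by_cases h2 : c = '>'
        · rw [List.find?_cons_of_pos (by simp [h2])]; simp [h2]
        · rw [List.find?_cons_of_neg (by simp [h1, h2])]
          simp only [h1, h2, if_false]
          cases state with
          | some b => rfl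
          | none =>
            rw [altLoop_after (i : Int) rest (i + 1) none (by push_cast; omega)]
            simp
    · have hlt : i < t := by omega
      rw [if_neg (by exact_mod_cast fun he => hit (by exact_mod_cast he))]
      have hrec := ih (i + 1) (if c = '<' then some true else if c = '>' then some false else state)
        (by omega)
      rw [hrec]
      have hidx : t - (i + 1) + 1 = t - i := by omega
      have hcond : (t - (i + 1) < rest.length) = (t - i < (c :: rest).length) := by
        simp only [List.length_cons]; rw [eq_iff_iff]; omega
      by_cases hl : t - i < (c :: rest).length
      · have hl' : t - (i + 1) < rest.length := by
          simp only [List.length_cons] at hl; omega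
        rw [if_pos hl', if_pos hl, hidx]
        have htake : (c :: rest).take (t - i + 1) = c :: rest.take (t - i) := by
          rw [show t - i + 1 = (t - i) + 1 from rfl, List.take_succ_cons]
        rw [htake, List.reverse_cons, List.find?_append]
        cases hf : rest.take (t - i) |>.reverse.find? (fun c => c = '<' || c = '>') with
        | some d => simp [hf]
        | none =>
          simp only [hf, Option.none_or]
          by_cases h1 : c = '<'
          · rw [List.find?_cons_of_pos (by simp [h1])]; simp [h1]
          · by_cases h2 : c = '>'
            · rw [List.find?_cons_of_pos (by simp [h2])]; simp [h2]
            · rw [List.find?_cons_of_neg (by simp [h1, h2])]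
              simp only [h1, h2, if_false, List.find?_nil]
              have hdrop : (c :: rest).drop (t - i + 1) = rest.drop (t - i) := rfl
              rw [hdrop]
      · have hl' : ¬ (t - (i + 1) < rest.length) := by
          simp only [List.length_cons] at hl; omega
        rw [if_neg hl', if_neg hl]

-- ===== VERDICT (by name: the statement is the Claim_ definition above) =====
theorem is_sign_spec : Claim_equal_is_sign := by
  intro num sentence index _ hPre
  obtain ⟨h0, h1⟩ := hPre
  unfold Spec_is_sign is_sign is_sign_alt
  obtain ⟨t, rfl⟩ : ∃ t : Nat, index = (t : Int) := ⟨index.toNat, (Int.toNat_of_nonneg h0).symm⟩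
  have ht : t < sentence.toList.length := by exact_mod_cast h1
  rw [if_pos ⟨Int.natCast_nonneg t, h1⟩,
    altLoop_before t sentence.toList 0 none (Nat.zero_le t), if_pos (by omega),
    isSignLeft_char sentence.toList t ht]
  simp only [Nat.sub_zero]
  cases hfl : (sentence.toList.take (t + 1)).reverse.find? (fun c => c = '<' || c = '>') with
  | some c => simp
  | none =>
    -- the prefix has no bracket, in particular s[t] is no bracket, so A's right scan from t
    -- agrees with B's search from t+1
    simp only [Option.map_none]
    have htake : sentence.toList.take (t + 1)
        = sentence.toList.take t ++ [sentence.toList[t]] := List.take_succ_eq_append_getElem ht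
    have hbr : ¬ ((sentence.toList[t] = '<' || sentence.toList[t] = '>') = true) :=
      List.find?_eq_none.mp hfl _ (by
        rw [htake, List.reverse_append, List.reverse_singleton, List.singleton_append]
        exact List.mem_cons_self)
    rw [isSignRight_char sentence.toList t, List.drop_eq_getElem_cons ht,
      List.find?_cons_of_neg (p := fun c => c = '<' || c = '>') hbr]
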